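-- pv_equiv track=rewrite | github.com/pypi-data/pypi-mirror-246 | packages/kalapaocr/kalapaocr-0.0.6-py3-none-any.whl/kalapaocr/utils.py | process_text_level2
-- ===== SOURCE A (Python) =====
-- def process_text_level2(text, last_idx_char):
--     words = text.split(" ")
--     idx_start_word = 0
--     for i, word in enumerate(words):
--         if i < len(words) - 1:
--             word = word + " "
--         idx_end_word = idx_start_word + len(word) - 1
--         if last_idx_char in range(idx_start_word, idx_end_word + 1):
--             return text[: idx_end_word + 1]
--         idx_start_word = idx_end_word + 1
--     return text[:last_idx_char]
-- ===== SOURCE B (Python) =====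
-- def process_text_level2(text, last_idx_char):
--     if 0 <= last_idx_char < len(text):
--         s = text.find(" ", last_idx_char)
--         return text if s == -1 else text[: s + 1]
--     return text[:last_idx_char]
-- ===== Notes on version B (the rewrite author's own statement) =====
-- stated objective: idiomatic
-- what changed: B drops the split-into-words loop with its running offset and instead checks the index bounds and locates the end of the containing word with a single text.find(' ', last_idx_char).
import Mathlib
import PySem

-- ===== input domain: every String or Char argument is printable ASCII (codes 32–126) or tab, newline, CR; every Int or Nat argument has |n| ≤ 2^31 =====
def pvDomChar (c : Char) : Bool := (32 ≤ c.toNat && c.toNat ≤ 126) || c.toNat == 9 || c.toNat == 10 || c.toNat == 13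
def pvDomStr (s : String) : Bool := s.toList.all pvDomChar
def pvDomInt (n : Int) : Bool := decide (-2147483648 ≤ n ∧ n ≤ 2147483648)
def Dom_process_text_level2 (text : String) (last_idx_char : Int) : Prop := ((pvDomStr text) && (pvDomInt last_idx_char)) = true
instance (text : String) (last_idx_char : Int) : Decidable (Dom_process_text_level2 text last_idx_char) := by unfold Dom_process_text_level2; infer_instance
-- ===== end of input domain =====

-- B replaces A's split-into-words loop with a bounds check plus a single text.find(' ', i); idiomatic, same result.

-- ===== PORT A =====
-- the for-loop over enumerate(words): i = running index, n = len(words), idx_start = running offset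
def pvA_loop (text : String) (last_idx_char : Int) (n : Nat) :
    List (List Char) → Nat → Int → String
  | [], _, _ => PySem.Str.slice text none (some last_idx_char)
  | w :: ws, i, idx_start =>
      let word := if i < n - 1 then w ++ [' '] else w
      let idx_end := idx_start + PySem.Chars.len word - 1
      if idx_start ≤ last_idx_char ∧ last_idx_char < idx_end + 1 then
        PySem.Str.slice text none (some (idx_end + 1))
      else
        pvA_loop text last_idx_char n ws (i + 1) (idx_end + 1)

def process_text_level2 (text : String) (last_idx_char : Int) : String :=
  -- text.split(" "): the separator " " is nonempty, so this is Chars.splitOn on the character list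
  let words := PySem.Chars.splitOn text.toList [' ']
  pvA_loop text last_idx_char words.length words 0 0

-- ===== PORT B =====
def process_text_level2_alt (text : String) (last_idx_char : Int) : String :=
  if 0 ≤ last_idx_char ∧ last_idx_char < PySem.Str.len text then
    let s := PySem.Str.findFrom text " " last_idx_char
    if s = -1 then text else PySem.Str.slice text none (some (s + 1))
  else
    PySem.Str.slice text none (some last_idx_char)

-- ===== PRECONDITION & SPEC =====
def Spec_process_text_level2 (text : String) (last_idx_char : Int) (out : String) : Prop := out = process_text_level2_alt text last_idx_char
instance (text : String) (last_idx_char : Int) (out : String) : Decidable (Spec_process_text_level2 text last_idx_char out) := by unfold Spec_process_text_level2; infer_instance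

-- ===== CLAIM (what is proved, stated in full; the proofs are below) =====
def Claim_equal_process_text_level2 : Prop := ∀ (text : String) (last_idx_char : Int), Dom_process_text_level2 text last_idx_char → Spec_process_text_level2 text last_idx_char (process_text_level2 text last_idx_char)

-- ===== LEMMAS AND PROOFS =====

-- structural form of splitting a char list at ' ' (proof-side mirror of Chars.splitOn.go)
def pvSp (cur : List Char) : List Char → List (List Char)
  | [] => [cur]
  | c :: rest => if c = ' ' then cur :: pvSp [] rest else pvSp (cur ++ [c]) rest

theorem pvSp_cons_space (cur rest : List Char) : pvSp cur (' ' :: rest) = cur :: pvSp [] rest := by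
  simp [pvSp]

theorem pvSp_cons_ne (c : Char) (cur rest : List Char) (hc : c ≠ ' ') :
    pvSp cur (c :: rest) = pvSp (cur ++ [c]) rest := by
  simp [pvSp, hc]

theorem pvGo_eq (fuel : Nat) : ∀ (l cur : List Char) (acc : List (List Char)), l.length ≤ fuel →
    PySem.Chars.splitOn.go [' '] fuel l cur acc = acc.reverse ++ pvSp cur.reverse l := by
  induction fuel with
  | zero =>
      intro l cur acc h
      have : l = [] := List.eq_nil_of_length_eq_zero (Nat.le_zero.mp h)
      subst this
      simp [PySem.Chars.splitOn.go, pvSp]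
  | succ m ih =>
      intro l cur acc h
      cases l with
      | nil => simp [PySem.Chars.splitOn.go, pvSp]
      | cons c rest =>
          by_cases hc : c = ' '
          · subst hc
            rw [show PySem.Chars.splitOn.go [' '] (m + 1) (' ' :: rest) cur acc
                  = PySem.Chars.splitOn.go [' '] m rest [] (cur.reverse :: acc) from by
                simp [PySem.Chars.splitOn.go, List.isPrefixOf]]
            rw [ih rest [] (cur.reverse :: acc) (by simpa using h)]
            rw [pvSp_cons_space]
            simp
          · rw [show PySem.Chars.splitOn.go [' '] (m + 1) (c :: rest) cur acc
                  = PySem.Chars.splitOn.go [' '] m rest (c :: cur) acc from by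
                simp [PySem.Chars.splitOn.go, List.isPrefixOf, Ne.symm hc]]
            rw [ih rest (c :: cur) acc (by simpa using h)]
            rw [pvSp_cons_ne c _ _ hc]
            simp

theorem pvSplitOn_eq (cs : List Char) : PySem.Chars.splitOn cs [' '] = pvSp [] cs := by
  unfold PySem.Chars.splitOn
  rw [pvGo_eq (cs.length + 1) cs [] [] (Nat.le_succ _)]
  simp

theorem pvSp_ne_nil : ∀ (l cur : List Char), pvSp cur l ≠ [] := by
  intro l
  induction l with
  | nil => intro cur; simp [pvSp]
  | cons c rest ih => intro cur; by_cases hc : c = ' ' <;> simp [pvSp, hc, ih]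

theorem pvJoin_cons (a : List Char) (ws : List (List Char)) (h : ws ≠ []) :
    PySem.Chars.join [' '] (a :: ws) = a ++ ' ' :: PySem.Chars.join [' '] ws := by
  cases ws with
  | nil => exact absurd rfl h
  | cons b t => rw [PySem.Chars.join_cons_cons]; simp

theorem pvSp_join : ∀ (l cur : List Char), PySem.Chars.join [' '] (pvSp cur l) = cur ++ l := by
  intro l
  induction l with
  | nil => intro cur; simp [pvSp, PySem.Chars.join_singleton]
  | cons c rest ih =>
      intro cur
      by_cases hc : c = ' '
      · subst hc
        rw [pvSp_cons_space, pvJoin_cons _ _ (pvSp_ne_nil rest []), ih []]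
        simp
      · rw [pvSp_cons_ne c _ _ hc, ih (cur ++ [c])]
        simp

theorem pvSp_nospace : ∀ (l cur : List Char), ' ' ∉ cur → ∀ w ∈ pvSp cur l, ' ' ∉ w := by
  intro l
  induction l with
  | nil =>
      intro cur hcur w hw
      rw [show pvSp cur [] = [cur] from rfl, List.mem_singleton] at hw
      exact hw ▸ hcur
  | cons c rest ih =>
      intro cur hcur w hw
      by_cases hc : c = ' '
      · subst hc
        rw [pvSp_cons_space, List.mem_cons] at hw
        cases hw with
        | inl h => exact h ▸ hcur
        | inr h => exact ih [] (List.not_mem_nil) w h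
      · rw [pvSp_cons_ne c _ _ hc] at hw
        refine ih (cur ++ [c]) ?_ w hw
        intro hmem
        rcases List.mem_append.mp hmem with h | h
        · exact hcur h
        · simp at h; exact hc h.symm

theorem pvSingleton_infix_iff (c : Char) (l : List Char) : [c] <:+: l ↔ c ∈ l := by
  constructor
  · intro h; exact h.sublist.subset (by simp)
  · intro h
    obtain ⟨s, t, rfl⟩ := List.append_of_mem h
    exact ⟨s, t, by simp⟩

theorem pvFind_space (u v : List Char) (hu : ' ' ∉ u) :
    PySem.Chars.find (u ++ ' ' :: v) [' '] = (u.length : Int) := by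
  set l := u ++ ' ' :: v with hl
  have hmem : ' ' ∈ l := by simp [hl]
  have hnn : 0 ≤ PySem.Chars.find l [' '] :=
    (PySem.Chars.find_nonneg_iff l [' ']).mpr ((pvSingleton_infix_iff ' ' l).mpr hmem)
  obtain ⟨hpre, hmin⟩ := PySem.Chars.find_spec hnn
  set k := (PySem.Chars.find l [' ']).toNat with hk
  have hget : l[k]? = some ' ' := by
    obtain ⟨t, ht⟩ := hpre
    have : (l.drop k)[0]? = some ' ' := by rw [← ht]; rfl
    simpa using this
  have hk_ge : u.length ≤ k := by
    by_contra hlt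
    simp at hlt
    have : l[k]? = u[k]? := by
      rw [hl, List.getElem?_append_left hlt]
    rw [this] at hget
    exact hu (List.mem_of_getElem? hget)
  have hk_le : k ≤ u.length := by
    by_contra hgt
    simp at hgt
    exact hmin u.length hgt ⟨v, by simp [hl]⟩
  have : k = u.length := le_antisymm hk_le hk_ge
  omega

-- one-step unfoldings of the A-side loop
theorem pvA_loop_nil (text : String) (last : Int) (n : Nat) (i : Nat) (s : Int) :
    pvA_loop text last n [] i s = PySem.Str.slice text none (some last) := rfl

theorem pvA_loop_cons (text : String) (last : Int) (n : Nat) (w : List Char)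
    (ws : List (List Char)) (i : Nat) (s : Int) :
    pvA_loop text last n (w :: ws) i s =
      (let word := if i < n - 1 then w ++ [' '] else w
       let idx_end := s + PySem.Chars.len word - 1
       if s ≤ last ∧ last < idx_end + 1 then PySem.Str.slice text none (some (idx_end + 1))
       else pvA_loop text last n ws (i + 1) (idx_end + 1)) := rfl

-- the loop of A, characterised in the shape of B
theorem pvA_loop_eq (text : String) (last : Int) (n : Nat) :
    ∀ (ws : List (List Char)) (pre : List Char) (i : Nat),
      ws ≠ [] →
      text.toList = pre ++ PySem.Chars.join [' '] ws →
      (∀ w ∈ ws, ' ' ∉ w) →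
      i + ws.length = n →
      pvA_loop text last n ws i (pre.length : Int) =
        if (pre.length : Int) ≤ last ∧ last < (text.toList.length : Int) then
          (if PySem.Chars.findFrom text.toList [' '] last = -1 then text
           else PySem.Str.slice text none (some (PySem.Chars.findFrom text.toList [' '] last + 1)))
        else PySem.Str.slice text none (some last) := by
  intro ws
  induction ws with
  | nil => intro pre i h; exact absurd rfl h
  | cons w ws' ih =>
      intro pre i _ htext hns hn
      have hw_ns : ' ' ∉ w := hns w (by simp)
      cases ws' with
      | nil =>
          have hni : ¬ (i < n - 1) := by simp at hn; omega
          rw [PySem.Chars.join_singleton] at htext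
          have hlen : text.toList.length = pre.length + w.length := by rw [htext]; simp
          rw [pvA_loop_cons]
          simp only [if_neg hni, PySem.Chars.len]
          by_cases hC : (pre.length : Int) ≤ last ∧ last < (pre.length : Int) + (w.length : Int)
          · rw [if_pos (by omega)]
            rw [if_pos (by omega)]
            have hkk : last.toNat ≤ text.toList.length := by omega
            have hfind : PySem.Chars.findFrom text.toList [' '] last = -1 := by
              rw [show last = ((last.toNat : Nat) : Int) from by omega,
                PySem.Chars.findFrom_natCast_eq_neg_one_iff _ _ _ hkk]
              intro hinf
              have hmem : ' ' ∈ text.toList.drop last.toNat := (pvSingleton_infix_iff _ _).mp hinf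
              rw [htext, List.drop_append, List.drop_eq_nil_of_le (by omega)] at hmem
              simp only [List.nil_append] at hmem
              exact hw_ns (List.drop_subset _ _ hmem)
            rw [if_pos hfind]
            have he : (pre.length : Int) + (w.length : Int) - 1 + 1 = (text.toList.length : Int) := by
              omega
            rw [he]
            apply String.toList_inj.mp
            rw [PySem.Str.toList_slice, PySem.Chars.slice_eq_listSlice,
              PySem.List.slice_to _ (by omega)]
            simp
          · rw [if_neg (by omega)]
            rw [pvA_loop_nil]
            rw [if_neg (by omega)]
      | cons w2 ws'' =>
          have hiw : i < n - 1 := by simp at hn; omega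
          rw [pvJoin_cons w (w2 :: ws'') (by simp)] at htext
          have hlen : text.toList.length
              = pre.length + w.length + 1 + (PySem.Chars.join [' '] (w2 :: ws'')).length := by
            rw [htext]; simp; try omega
          rw [pvA_loop_cons]
          simp only [if_pos hiw, PySem.Chars.len, List.length_append, List.length_singleton]
          by_cases hC : (pre.length : Int) ≤ last ∧ last < (pre.length : Int) + (w.length : Int) + 1
          · rw [if_pos (by omega)]
            rw [if_pos (by omega)]
            have h0 : (0:Int) ≤ last := le_trans (by positivity) hC.1
            have hUlen : (pre ++ w).length = pre.length + w.length := by simp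
            have hkle : last.toNat ≤ (pre ++ w).length := by omega
            have htext' : text.toList = (pre ++ w) ++ ' ' :: PySem.Chars.join [' '] (w2 :: ws'') := by
              rw [htext]; simp
            have hdrop : text.toList.drop last.toNat
                = (pre ++ w).drop last.toNat ++ ' ' :: PySem.Chars.join [' '] (w2 :: ws'') := by
              rw [htext', List.drop_append_of_le_length hkle]
            have hnsU : ' ' ∉ (pre ++ w).drop last.toNat := by
              rw [List.drop_append, List.drop_eq_nil_of_le (by omega)]
              simp only [List.nil_append]
              exact fun hmem => hw_ns (List.drop_subset _ _ hmem)
            have hff : PySem.Chars.findFrom text.toList [' '] last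
                = ((pre.length + w.length : Nat) : Int) := by
              rw [show last = ((last.toNat : Nat) : Int) from by omega,
                PySem.Chars.findFrom_natCast _ _ _ (by omega)]
              rw [hdrop, pvFind_space _ _ hnsU]
              rw [if_neg (by omega)]
              rw [List.length_drop, hUlen]
              omega
            rw [hff]
            rw [if_neg (by omega)]
            have he : (pre.length : Int) + ((w.length + 1 : Nat) : Int) - 1 + 1
                = ((pre.length + w.length : Nat) : Int) + 1 := by push_cast; ring
            rw [he]
          · rw [if_neg (by push_cast; omega)]
            have hns' : ∀ w' ∈ w2 :: ws'', ' ' ∉ w' := fun w' h => hns w' (by simp [h])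
            have hrec := ih (pre ++ w ++ [' ']) (i + 1) (by simp)
              (by rw [htext]; simp) hns' (by simp only [List.length_cons] at hn ⊢; omega)
            have harg : (pre.length : Int) + ((w.length + 1 : Nat) : Int) - 1 + 1
                = (((pre ++ w ++ [' ']).length : Nat) : Int) := by push_cast; simp; try ring
            rw [harg, hrec]
            have hpre' : (((pre ++ w ++ [' ']).length : Nat) : Int)
                = (pre.length : Int) + (w.length : Int) + 1 := by simp; try ring
            rw [hpre']
            have hcond : (((pre.length : Int) + (w.length : Int) + 1 ≤ last
                  ∧ last < (text.toList.length : Int))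
                ↔ ((pre.length : Int) ≤ last ∧ last < (text.toList.length : Int))) := by
              omega
            simp only [hcond]

-- ===== VERDICT (by name: the statement is the Claim_ definition above) =====
theorem process_text_level2_spec : Claim_equal_process_text_level2 := by
  intro text last _
  unfold Spec_process_text_level2 process_text_level2 process_text_level2_alt
  rw [pvSplitOn_eq]
  have h := pvA_loop_eq text last (pvSp [] text.toList).length (pvSp [] text.toList) [] 0
    (pvSp_ne_nil _ _) (by rw [pvSp_join]; rfl) (pvSp_nospace _ _ (by simp)) (by simp)
  simp only [List.length_nil, Nat.cast_zero] at h
  rw [h]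
  simp only [PySem.Str.len_eq, PySem.Str.findFrom_eq]
  rfl
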